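-- pv_equiv track=rewrite | github.com/DOOMinikThunder/NNLangID | LanguageIdentification/src/input/DataSplit.py | __split_by_languages
-- ===== SOURCE A (Python) =====
-- def __split_by_languages(input):
--     """
--     splits input list in dict with entries 'language': tweets with this language
--
--     Args:
--         input: input tweets and language
--
--     Returns:
--          languages_splitted: dict containing the splitted languages
--     """
--     languages_splitted = {}
--     for tweet in input:
--         if tweet[2] in languages_splitted:
--             languages_splitted[tweet[2]].append(tweet)
--         else:
--             languages_splitted[tweet[2]] = [tweet]
--     return languages_splitted
-- ===== SOURCE B (Python) =====
-- def __split_by_languages(input):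
--     """
--     splits input list in dict with entries 'language': tweets with this language
--     """
--     langs = list(dict.fromkeys(t[2] for t in input))
--     return {lang: [t for t in input if t[2] == lang] for lang in langs}
-- ===== Notes on version B (the rewrite author's own statement) =====
-- stated objective: alternative
-- what changed: B replaces A's single left-to-right pass that mutates a dict of growing lists with a two-phase plan: first an ordered dedup of the languages (dict.fromkeys), then one filter pass over the input per language.
import Mathlib
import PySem

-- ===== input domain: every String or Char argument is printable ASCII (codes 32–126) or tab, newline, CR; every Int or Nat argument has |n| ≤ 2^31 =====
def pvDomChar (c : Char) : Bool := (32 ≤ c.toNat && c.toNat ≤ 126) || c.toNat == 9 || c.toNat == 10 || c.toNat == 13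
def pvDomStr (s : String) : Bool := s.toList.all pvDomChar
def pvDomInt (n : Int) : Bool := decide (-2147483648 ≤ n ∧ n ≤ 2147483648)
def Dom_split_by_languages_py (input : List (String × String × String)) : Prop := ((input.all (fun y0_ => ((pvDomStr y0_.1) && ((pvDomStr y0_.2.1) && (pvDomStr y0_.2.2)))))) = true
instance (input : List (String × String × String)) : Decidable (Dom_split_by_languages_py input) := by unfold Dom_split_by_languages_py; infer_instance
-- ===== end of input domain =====

-- B groups by language in two phases (ordered dedup of languages, then one filter per language)
-- instead of A's single mutating-dict pass; objective: alternative decomposition, same results.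


-- ===== PORT A =====
-- literal port of A: fold over the tweets, mutating a dict of growing lists (returned as its items list)
def split_by_languages_py (input : List (String × String × String)) : List (String × List (String × String × String)) :=
  (input.foldl
    (fun languages_splitted tweet =>
      if languages_splitted.contains tweet.2.2 then
        languages_splitted.modify tweet.2.2 [] (fun lst => lst ++ [tweet])
      else
        languages_splitted.insert tweet.2.2 [tweet])
    (PySem.Dict.empty : PySem.Dict String (List (String × String × String)))).items

-- ===== PORT B =====
-- port of B: ordered dedup of the languages, then a filter pass per language
def split_by_languages_py_alt (input : List (String × String × String)) : List (String × List (String × String × String)) :=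
  (PySem.List.dedup (input.map (fun t => t.2.2))).map
    (fun lang => (lang, input.filter (fun t => t.2.2 == lang)))

-- ===== PRECONDITION & SPEC =====
def Spec_split_by_languages_py (input : List (String × String × String)) (out : List (String × List (String × String × String))) : Prop := out = split_by_languages_py_alt input
instance (input : List (String × String × String)) (out : List (String × List (String × String × String))) : Decidable (Spec_split_by_languages_py input out) := by unfold Spec_split_by_languages_py; infer_instance

-- ===== CLAIM (what is proved, stated in full; the proofs are below) =====
def Claim_equal_split_by_languages_py : Prop := ∀ (input : List (String × String × String)), Dom_split_by_languages_py input → Spec_split_by_languages_py input (split_by_languages_py input)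

-- ===== LEMMAS AND PROOFS =====

-- find? on a key-tagged map finds the key's own entry
theorem pv_find_map {α β : Type} [BEq α] [LawfulBEq α] (f : α → β) (a : α) :
    ∀ (K : List α), a ∈ K →
      List.find? (fun p => p.1 == a) (K.map (fun l => (l, f l))) = some (a, f a) := by
  intro K
  induction K with
  | nil => intro h; cases h
  | cons k K ih =>
    intro h
    by_cases hk : k = a
    · subst hk; simp
    · have : a ∈ K := by
        rcases List.mem_cons.mp h with h | h
        · exact absurd h.symm hk
        · exact h
      simp [hk, ih this]

-- contains on a key-tagged dict is membership in the key list
theorem pv_contains_map {α β : Type} [BEq α] [LawfulBEq α] (f : α → β) (a : α) (K : List α) :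
    (PySem.Dict.mk (K.map (fun l => (l, f l)))).contains a = true ↔ a ∈ K := by
  simp [PySem.Dict.contains, List.any_map, Function.comp, List.any_eq_true]

-- ordered dedup of an appended singleton
theorem pv_dedup_append {α : Type} [BEq α] [LawfulBEq α] (ys : List α) (a : α) :
    PySem.List.dedup (ys ++ [a]) =
      if a ∈ ys then PySem.List.dedup ys else PySem.List.dedup ys ++ [a] := by
  show PySem.Set.ofList (ys ++ [a]) = _
  rw [PySem.Set.ofList, List.foldl_append]
  change PySem.Set.add (List.foldl PySem.Set.add PySem.Set.empty ys) a = _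
  change PySem.Set.add (PySem.Set.ofList ys) a = _
  rw [PySem.Set.add]
  by_cases ha : a ∈ ys
  · have hc : PySem.Set.contains (PySem.Set.ofList ys) a = true := by
      simp [PySem.Set.contains]; exact ha
    rw [if_pos hc, if_pos ha]; rfl
  · have hc : ¬ (PySem.Set.contains (PySem.Set.ofList ys) a = true) := by
      simp [PySem.Set.contains]; exact ha
    rw [if_neg hc, if_neg ha]; rfl

-- a language absent from the language list filters to nothing
theorem pv_filter_absent (xs : List (String × String × String)) (a : String)
    (ha : a ∉ xs.map (fun t => t.2.2)) :
    xs.filter (fun t => t.2.2 == a) = [] := by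
  rw [List.filter_eq_nil_iff]
  intro t ht hta
  exact ha (List.mem_map.mpr ⟨t, ht, by simpa using hta⟩)

-- insert over an existing key rewrites that key's entry in place
theorem pv_insert_mem {α β : Type} [BEq α] [LawfulBEq α] (f : α → β) (K : List α) (a : α) (v : β)
    (h : a ∈ K) :
    (PySem.Dict.insert (PySem.Dict.mk (K.map (fun l => (l, f l)))) a v).items
      = K.map (fun l => if l == a then (a, v) else (l, f l)) := by
  rw [PySem.Dict.insert, if_pos ((pv_contains_map f a K).mpr h)]
  show List.map _ (K.map (fun l => (l, f l))) = _
  rw [List.map_map]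
  apply List.map_congr_left
  intro l _
  by_cases hla : l = a
  · subst hla; simp
  · simp [Function.comp, show (l == a) = false by simpa using hla]

-- insert of a fresh key appends its entry
theorem pv_insert_not_mem {α β : Type} [BEq α] [LawfulBEq α] (f : α → β) (K : List α) (a : α) (v : β)
    (h : a ∉ K) :
    (PySem.Dict.insert (PySem.Dict.mk (K.map (fun l => (l, f l)))) a v).items
      = K.map (fun l => (l, f l)) ++ [(a, v)] := by
  rw [PySem.Dict.insert, if_neg (by rw [pv_contains_map f a K]; exact h)]

-- getD on a key-tagged dict reads off the tag
theorem pv_getD_mem {α β : Type} [BEq α] [LawfulBEq α] (f : α → β) (K : List α) (a : α) (dflt : β)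
    (h : a ∈ K) :
    (PySem.Dict.mk (K.map (fun l => (l, f l)))).getD a dflt = f a := by
  simp [PySem.Dict.getD, PySem.Dict.get?, pv_find_map f a K h]

-- main invariant: the fold's items equal B's dedup-and-filter result
theorem pv_main (xs : List (String × String × String)) :
    (xs.foldl
      (fun languages_splitted tweet =>
        if languages_splitted.contains tweet.2.2 then
          languages_splitted.modify tweet.2.2 [] (fun lst => lst ++ [tweet])
        else
          languages_splitted.insert tweet.2.2 [tweet])
      (PySem.Dict.empty : PySem.Dict String (List (String × String × String)))).items =
    (PySem.List.dedup (xs.map (fun t => t.2.2))).map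
      (fun lang => (lang, xs.filter (fun t => t.2.2 == lang))) := by
  induction xs using List.reverseRecOn with
  | nil => rfl
  | append_singleton xs t ih =>
    obtain ⟨t1, t2, a⟩ := t
    rw [List.foldl_append]
    simp only [List.foldl]
    have hfold : (xs.foldl
        (fun languages_splitted tweet =>
          if languages_splitted.contains tweet.2.2 then
            languages_splitted.modify tweet.2.2 [] (fun lst => lst ++ [tweet])
          else
            languages_splitted.insert tweet.2.2 [tweet])
        (PySem.Dict.empty : PySem.Dict String (List (String × String × String))))
        = PySem.Dict.mk ((PySem.List.dedup (xs.map (fun t => t.2.2))).map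
            (fun lang => (lang, xs.filter (fun t => t.2.2 == lang)))) := by
      rw [← ih]
    rw [hfold]
    have hmapapp : ((xs ++ [((t1, t2, a) : String × String × String)]).map (fun t => t.2.2))
        = xs.map (fun t => t.2.2) ++ [a] := by simp
    rw [hmapapp, pv_dedup_append]
    by_cases hmem : a ∈ xs.map (fun t => t.2.2)
    · -- existing language: the fold rewrites that entry in place
      have hmemD : a ∈ PySem.List.dedup (xs.map (fun t => t.2.2)) :=
        (PySem.Set.mem_ofList _ a).mpr hmem
      rw [if_pos ((pv_contains_map (fun lang => xs.filter (fun t => t.2.2 == lang)) a _).mpr hmemD)]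
      rw [PySem.Dict.modify,
        pv_getD_mem (fun lang => xs.filter (fun t => t.2.2 == lang)) _ a [] hmemD,
        pv_insert_mem (fun lang => xs.filter (fun t => t.2.2 == lang)) _ a _ hmemD,
        if_pos hmem]
      apply List.map_congr_left
      intro l _
      by_cases hla : l = a
      · subst hla; simp [List.filter_append]
      · simp [show (l == a) = false by simpa using hla,
          show (a == l) = false by simpa using Ne.symm hla, List.filter_append]
    · -- new language: appended at the end, and its filter over xs is empty
      have hmemD : a ∉ PySem.List.dedup (xs.map (fun t => t.2.2)) :=
        fun h => hmem ((PySem.Set.mem_ofList _ a).mp h)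
      rw [if_neg (by
        rw [pv_contains_map (fun lang => xs.filter (fun t => t.2.2 == lang)) a _]
        exact hmemD)]
      rw [pv_insert_not_mem (fun lang => xs.filter (fun t => t.2.2 == lang)) _ a _ hmemD,
        if_neg hmem, List.map_append]
      congr 1
      · apply List.map_congr_left
        intro l hl
        have hla : l ≠ a := fun h => hmemD (h ▸ hl)
        simp [show (a == l) = false by simpa using Ne.symm hla, List.filter_append]
      · simp [List.filter_append, pv_filter_absent xs a hmem]

-- ===== VERDICT (by name: the statement is the Claim_ definition above) =====
theorem split_by_languages_py_spec : Claim_equal_split_by_languages_py := by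
  intro input _
  show split_by_languages_py input = split_by_languages_py_alt input
  unfold split_by_languages_py split_by_languages_py_alt
  exact pv_main input
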